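-- pv_equiv track=rewrite | github.com/smyles96/PWC-Board-Scraper | resminer.py | _get_keyword_indexes
-- ===== SOURCE A (Python) =====
-- def _get_keyword_indexes(keywords, strings):
--     keyword_indexes = {keyword: -1 for keyword in keywords}
--
--     for i in range(0, len(strings)):
--         string = strings[i]
--         for keyword in keywords:
--             if keyword in string:
--                 keyword_indexes[keyword] = i
--
--     return keyword_indexes
-- ===== SOURCE B (Python) =====
-- def _get_keyword_indexes(keywords, strings):
--     return {
--         keyword: next((i for i in reversed(range(len(strings))) if keyword in strings[i]), -1)
--         for keyword in keywords
--     }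
-- ===== Notes on version B (the rewrite author's own statement) =====
-- stated objective: simpler
-- what changed: Replaces the mutable last-write-wins dict updated during a forward pass over all strings by a dict comprehension that computes each keyword's answer independently via a reverse scan with early termination.
import Mathlib
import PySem

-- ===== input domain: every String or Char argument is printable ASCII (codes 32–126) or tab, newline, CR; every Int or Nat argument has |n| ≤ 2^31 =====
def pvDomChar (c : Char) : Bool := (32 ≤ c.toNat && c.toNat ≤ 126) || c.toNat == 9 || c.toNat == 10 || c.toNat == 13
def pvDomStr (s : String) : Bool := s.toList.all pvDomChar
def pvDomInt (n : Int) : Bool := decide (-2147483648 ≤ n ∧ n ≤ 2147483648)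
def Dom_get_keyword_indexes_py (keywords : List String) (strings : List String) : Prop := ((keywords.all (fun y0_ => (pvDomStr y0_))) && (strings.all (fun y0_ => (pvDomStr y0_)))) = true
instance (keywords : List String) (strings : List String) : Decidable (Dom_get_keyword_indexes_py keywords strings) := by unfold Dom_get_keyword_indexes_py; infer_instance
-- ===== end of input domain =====

-- B replaces A's forward pass that overwrites a mutable dict by an independent
-- reverse scan with early exit per keyword (dict comprehension); same cost, simpler.


-- ===== PORT A =====
def get_keyword_indexes_py (keywords : List String) (strings : List String) : List (String × Int) :=
  -- keyword_indexes = {keyword: -1 for keyword in keywords}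
  let d0 : PySem.Dict String Int :=
    keywords.foldl (fun d keyword => d.insert keyword (-1)) PySem.Dict.empty
  -- for i in range(0, len(strings)): string = strings[i]; for keyword in keywords: if keyword in string: keyword_indexes[keyword] = i
  let d :=
    (PySem.List.pyRange 0 (strings.length : Int) 1).foldl (fun d i =>
      let string := PySem.List.pyGetD strings i ""
      keywords.foldl (fun d keyword =>
        if PySem.Str.isIn keyword string then d.insert keyword i else d) d) d0
  d.items

-- ===== PORT B =====
def get_keyword_indexes_py_alt (keywords : List String) (strings : List String) : List (String × Int) :=
  -- {keyword: next((i for i in reversed(range(len(strings))) if keyword in strings[i]), -1) for keyword in keywords}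
  (keywords.foldl (fun d keyword =>
      d.insert keyword
        (((PySem.List.pyRange 0 (strings.length : Int) 1).reverse.find?
            (fun i => PySem.Str.isIn keyword (PySem.List.pyGetD strings i ""))).getD (-1)))
    PySem.Dict.empty).items

-- ===== PRECONDITION & SPEC =====
def Spec_get_keyword_indexes_py (keywords : List String) (strings : List String) (out : List (String × Int)) : Prop := out = get_keyword_indexes_py_alt keywords strings
instance (keywords : List String) (strings : List String) (out : List (String × Int)) : Decidable (Spec_get_keyword_indexes_py keywords strings out) := by unfold Spec_get_keyword_indexes_py; infer_instance

-- ===== CLAIM (what is proved, stated in full; the proofs are below) =====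
def Claim_equal_get_keyword_indexes_py : Prop := ∀ (keywords : List String) (strings : List String), Dom_get_keyword_indexes_py keywords strings → Spec_get_keyword_indexes_py keywords strings (get_keyword_indexes_py keywords strings)

-- ===== LEMMAS AND PROOFS =====

-- the inner A-loop over keywords: keys are unchanged once every keyword is already present
theorem keys_inner (kws : List String) (p : String → Bool) (i : Int)
    (d : PySem.Dict String Int) (h : ∀ k ∈ kws, d.contains k = true) :
    (kws.foldl (fun d keyword => if p keyword then d.insert keyword i else d) d).keys = d.keys := by
  induction kws generalizing d with
  | nil => rfl
  | cons k ks ih =>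
    simp only [List.foldl_cons]
    by_cases hp : p k
    · simp only [hp, if_pos]
      rw [ih _ ?_, PySem.Dict.keys_insert_of_contains _ _ (h k (by simp))]
      intro k' hk'
      rw [PySem.Dict.contains_insert]
      simp [h k' (by simp [hk'])]
    · simp only [hp, if_neg, Bool.false_eq_true, not_false_iff]
      exact ih _ (fun k' hk' => h k' (by simp [hk']))

-- the inner A-loop: effect on a single key's value
theorem getD_inner (kws : List String) (p : String → Bool) (i : Int) (k0 : String) (dflt : Int)
    (d : PySem.Dict String Int) :
    (kws.foldl (fun d keyword => if p keyword then d.insert keyword i else d) d).getD k0 dflt =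
      if k0 ∈ kws ∧ p k0 = true then i else d.getD k0 dflt := by
  induction kws generalizing d with
  | nil => simp
  | cons k ks ih =>
    simp only [List.foldl_cons, ih]
    by_cases hk : k0 ∈ ks ∧ p k0 = true
    · simp [hk, List.mem_cons]
    · rw [if_neg hk]
      by_cases he : k0 = k
      · subst he
        by_cases hp : p k0 = true
        · simp [hp, PySem.Dict.getD_insert_self]
        · simp [hp]
      · by_cases hp : p k = true
        · simp only [hp, if_pos]
          rw [PySem.Dict.getD_insert_of_ne _ _ _ (by exact he)]
          simp [List.mem_cons, he, hk]
        · simp [hp, List.mem_cons, he, hk]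

-- the outer A-loop over string indexes: value at k0 is the reversed-scan answer
theorem getD_outer (kws : List String) (strings : List String) (k0 : String) (hk0 : k0 ∈ kws)
    (L : List Int) (d : PySem.Dict String Int) :
    ((L.foldl (fun d i =>
        kws.foldl (fun d keyword =>
          if PySem.Str.isIn keyword (PySem.List.pyGetD strings i "") then d.insert keyword i else d) d) d).getD k0 (-1)) =
      match L.reverse.find? (fun i => PySem.Str.isIn k0 (PySem.List.pyGetD strings i "")) with
      | some i => i
      | none => d.getD k0 (-1) := by
  induction L generalizing d with
  | nil => rfl
  | cons i L ih =>
    simp only [List.foldl_cons, List.reverse_cons, List.find?_append, ih, getD_inner]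
    cases hf : L.reverse.find? (fun i => PySem.Str.isIn k0 (PySem.List.pyGetD strings i "")) with
    | some j => simp
    | none =>
      cases hp : PySem.Chars.isIn k0.toList (PySem.List.pyGetD strings i "").toList with
      | true => simp [List.find?, PySem.Str.isIn_eq, hp, hk0]
      | false => simp [List.find?, PySem.Str.isIn_eq, hp]

-- the outer A-loop preserves keys once every keyword is present
theorem keys_outer (kws : List String) (strings : List String) (L : List Int)
    (d : PySem.Dict String Int) (h : ∀ k ∈ kws, d.contains k = true) :
    (L.foldl (fun d i =>
        kws.foldl (fun d keyword =>
          if PySem.Str.isIn keyword (PySem.List.pyGetD strings i "") then d.insert keyword i else d) d) d).keys = d.keys := by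
  induction L generalizing d with
  | nil => rfl
  | cons i L ih =>
    simp only [List.foldl_cons]
    rw [ih, keys_inner _ _ _ _ h]
    intro k hk
    rw [PySem.Dict.contains_iff_mem_keys, keys_inner _ _ _ _ h,
        ← PySem.Dict.contains_iff_mem_keys]
    exact h k hk

-- the outer A-loop preserves nodup keys
theorem nodup_outer (kws : List String) (strings : List String) (L : List Int)
    (d : PySem.Dict String Int) (h : ∀ k ∈ kws, d.contains k = true) (hnd : d.keys.Nodup) :
    (L.foldl (fun d i =>
        kws.foldl (fun d keyword =>
          if PySem.Str.isIn keyword (PySem.List.pyGetD strings i "") then d.insert keyword i else d) d) d).keys.Nodup := by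
  rw [keys_outer _ _ _ _ h]; exact hnd

-- B's fold: value at a key of the dict
theorem getD_bfold (kws : List String) (v : String → Int) (k0 : String) (dflt : Int)
    (d : PySem.Dict String Int) :
    (kws.foldl (fun d keyword => d.insert keyword (v keyword)) d).getD k0 dflt =
      if k0 ∈ kws then v k0 else d.getD k0 dflt := by
  induction kws generalizing d with
  | nil => simp
  | cons k ks ih =>
    simp only [List.foldl_cons, ih]
    by_cases hk : k0 ∈ ks
    · simp [hk]
    · by_cases he : k0 = k
      · subst he; simp [hk, PySem.Dict.getD_insert_self]
      · rw [PySem.Dict.getD_insert_of_ne _ _ _ (by exact he)]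
        simp [List.mem_cons, he, hk]

theorem keys_d0 (kws : List String) :
    (kws.foldl (fun d keyword => d.insert keyword (-1 : Int)) PySem.Dict.empty).keys
      = PySem.Set.ofList kws := by
  rw [PySem.Dict.keys_foldl_insert, PySem.Dict.keys_empty, PySem.Set.update,
      PySem.Set.ofList_eq_foldl]

-- contains in d0 (all keywords inserted with -1)
theorem contains_d0 (kws : List String) (k : String) (hk : k ∈ kws) :
    ((kws.foldl (fun d keyword => d.insert keyword (-1 : Int)) PySem.Dict.empty).contains k) = true := by
  rw [PySem.Dict.contains_iff_mem_keys, keys_d0]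
  exact (PySem.Set.mem_ofList kws k).mpr hk

-- ===== VERDICT (by name: the statement is the Claim_ definition above) =====
-- d0 maps every key it holds to -1, and missing keys default to -1 too
theorem getD_d0 (kws : List String) (k : String) :
    (kws.foldl (fun d keyword => d.insert keyword (-1 : Int)) PySem.Dict.empty).getD k (-1) = -1 := by
  rw [getD_bfold kws (fun _ => (-1 : Int))]
  simp [PySem.Dict.getD_empty]

theorem get_keyword_indexes_py_spec : Claim_equal_get_keyword_indexes_py := by
  intro keywords strings _
  unfold Spec_get_keyword_indexes_py get_keyword_indexes_py get_keyword_indexes_py_alt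
  simp only []
  have hcont : ∀ k ∈ keywords,
      (keywords.foldl (fun d keyword => d.insert keyword (-1 : Int)) PySem.Dict.empty).contains k = true :=
    fun k hk => contains_d0 keywords k hk
  have hndA := nodup_outer keywords strings (PySem.List.pyRange 0 (strings.length : Int) 1)
    _ hcont (by rw [keys_d0]; exact PySem.Set.nodup_ofList keywords)
  have hndB : ((keywords.foldl (fun d keyword =>
      d.insert keyword
        (((PySem.List.pyRange 0 (strings.length : Int) 1).reverse.find?
            (fun i => PySem.Str.isIn keyword (PySem.List.pyGetD strings i ""))).getD (-1)))
      PySem.Dict.empty).keys).Nodup :=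
    PySem.Dict.nodup_keys_foldl_insert _ _ _ (by simp [PySem.Dict.keys_empty])
  rw [PySem.Dict.items_eq_map_keys _ hndA (-1), PySem.Dict.items_eq_map_keys _ hndB (-1),
      keys_outer keywords strings _ _ hcont, keys_d0,
      PySem.Dict.keys_foldl_insert, PySem.Dict.keys_empty, PySem.Set.update,
      ← PySem.Set.ofList_eq_foldl]
  apply List.map_congr_left
  intro k hkmem
  have hk : k ∈ keywords := (PySem.Set.mem_ofList keywords k).mp hkmem
  congr 1
  rw [getD_outer keywords strings k hk]
  conv_rhs => rw [getD_bfold]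
  rw [if_pos hk]
  cases hf : (PySem.List.pyRange 0 (strings.length : Int) 1).reverse.find?
      (fun i => PySem.Str.isIn k (PySem.List.pyGetD strings i "")) with
  | some j => simp
  | none => simp [getD_d0]
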